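-- pv_equiv track=rewrite | github.com/soulmatchdk/autoresearch-mlx-mem | locomo_eval.py | evidence_overlap
-- ===== SOURCE A (Python) =====
-- def evidence_overlap(events: list[dict], gold_evidence_ids: list[str]):
--     if not gold_evidence_ids:
--         return False
--     gold = set(gold_evidence_ids)
--     for event in events:
--         if gold.intersection(event.get("dia_ids", [])):
--             return True
--     return False
-- ===== SOURCE B (Python) =====
-- def evidence_overlap(events: list[dict], gold_evidence_ids: list[str]):
--     if not gold_evidence_ids:
--         return False
--     ids = sorted({x for event in events for x in event.get("dia_ids", [])})
--     gold = sorted(set(gold_evidence_ids))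
--     i = j = 0
--     while i < len(ids) and j < len(gold):
--         if ids[i] < gold[j]:
--             i += 1
--         elif gold[j] < ids[i]:
--             j += 1
--         else:
--             return True
--     return False
-- ===== Notes on version B (the rewrite author's own statement) =====
-- stated objective: alternative
-- what changed: B replaces A's hash-set intersection per event with a sort-based algorithm: it sorts the deduplicated union of all dia_ids and the deduplicated gold ids, then detects a common element with a single two-pointer merge scan.
import Mathlib
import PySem

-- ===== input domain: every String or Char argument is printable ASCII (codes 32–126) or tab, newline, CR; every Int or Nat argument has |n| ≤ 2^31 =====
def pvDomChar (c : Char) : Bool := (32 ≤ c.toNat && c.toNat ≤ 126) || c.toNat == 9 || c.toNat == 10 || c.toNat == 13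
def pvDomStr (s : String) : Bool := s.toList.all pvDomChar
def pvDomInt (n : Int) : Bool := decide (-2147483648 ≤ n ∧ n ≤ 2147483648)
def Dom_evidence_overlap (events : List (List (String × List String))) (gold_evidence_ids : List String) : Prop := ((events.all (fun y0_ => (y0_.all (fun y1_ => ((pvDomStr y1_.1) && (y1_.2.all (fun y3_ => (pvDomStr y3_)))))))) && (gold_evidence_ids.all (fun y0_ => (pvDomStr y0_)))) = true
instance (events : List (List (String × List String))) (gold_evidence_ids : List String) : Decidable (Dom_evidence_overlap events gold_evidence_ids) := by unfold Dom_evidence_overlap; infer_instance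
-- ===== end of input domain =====

-- B replaces A's per-event hash-set intersection with a sort-based algorithm: sort the deduplicated
-- union of all dia_ids and the deduplicated gold ids, then find a common element by a two-pointer
-- merge scan (alternative algorithm, not claimed faster).

-- shared primitive: Python event.get("dia_ids", []) on the association-list encoding of a dict
def pyGetDia (event : List (String × List String)) : List String :=
  match event.find? (fun p => p.1 == "dia_ids") with
  | some p => p.2
  | none => []

-- ===== PORT A =====
-- the 'for event in events' loop with its early 'return True'
def evidenceLoopA (gold : PySem.Set String) : List (List (String × List String)) → Bool
  | [] => false
  | event :: rest =>
    if !(PySem.Set.inter gold (pyGetDia event)).isEmpty then true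
    else evidenceLoopA gold rest

def evidence_overlap (events : List (List (String × List String))) (gold_evidence_ids : List String) : Bool :=
  if gold_evidence_ids.isEmpty then false
  else
    let gold := PySem.Set.ofList gold_evidence_ids
    evidenceLoopA gold events

-- ===== PORT B =====
-- the 'while i < len(ids) and j < len(gold)' two-pointer scan, as recursion on the suffixes ids[i:], gold[j:]
def mergeScan : List String → List String → Bool
  | [], _ => false
  | _ :: _, [] => false
  | a :: as, b :: bs =>
    if a < b then mergeScan as (b :: bs)
    else if b < a then mergeScan (a :: as) bs
    else true
termination_by xs ys => xs.length + ys.length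

def evidence_overlap_alt (events : List (List (String × List String))) (gold_evidence_ids : List String) : Bool :=
  if gold_evidence_ids.isEmpty then false
  else
    let ids := PySem.List.sorted (PySem.Set.ofList (events.flatMap pyGetDia)) (fun x => x) false
    let gold := PySem.List.sorted (PySem.Set.ofList gold_evidence_ids) (fun x => x) false
    mergeScan ids gold

-- ===== PRECONDITION & SPEC =====
def Spec_evidence_overlap (events : List (List (String × List String))) (gold_evidence_ids : List String) (out : Bool) : Prop := out = evidence_overlap_alt events gold_evidence_ids
instance (events : List (List (String × List String))) (gold_evidence_ids : List String) (out : Bool) : Decidable (Spec_evidence_overlap events gold_evidence_ids out) := by unfold Spec_evidence_overlap; infer_instance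

-- ===== CLAIM (what is proved, stated in full; the proofs are below) =====
def Claim_equal_evidence_overlap : Prop := ∀ (events : List (List (String × List String))) (gold_evidence_ids : List String), Dom_evidence_overlap events gold_evidence_ids → Spec_evidence_overlap events gold_evidence_ids (evidence_overlap events gold_evidence_ids)

-- ===== LEMMAS AND PROOFS =====

-- A's loop says: some event's dia_ids meets gold
theorem loopA_eq_true_iff (gold : PySem.Set String) (events : List (List (String × List String))) :
    evidenceLoopA gold events = true ↔
      ∃ ev ∈ events, ∃ x ∈ gold, x ∈ pyGetDia ev := by
  induction events with
  | nil => simp [evidenceLoopA]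
  | cons ev rest ih =>
    simp only [evidenceLoopA]
    by_cases h : (PySem.Set.inter gold (pyGetDia ev)).isEmpty = true
    · rw [if_neg (by simp [h]), ih]
      constructor
      · rintro ⟨e, he, x, hx, hd⟩; exact ⟨e, by simp [he], x, hx, hd⟩
      · rintro ⟨e, he, x, hx, hd⟩
        rcases List.mem_cons.mp he with rfl | he'
        · exfalso
          have : x ∈ PySem.Set.inter gold (pyGetDia e) :=
            (PySem.Set.mem_inter _ _ _).mpr ⟨hx, hd⟩
          rw [List.isEmpty_iff.mp h] at this
          exact absurd this (List.not_mem_nil)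
        · exact ⟨e, he', x, hx, hd⟩
    · rw [if_pos (by simp [h])]
      simp only [true_iff]
      have : PySem.Set.inter gold (pyGetDia ev) ≠ [] := by
        intro he; rw [he] at h; exact h rfl
      obtain ⟨x, hx⟩ := List.exists_mem_of_ne_nil _ this
      have := (PySem.Set.mem_inter _ _ _).mp hx
      exact ⟨ev, by simp, x, this.1, this.2⟩

-- B's merge scan on strictly increasing lists says: the lists share an element
theorem mergeScan_eq_true_iff (xs ys : List String)
    (hx : xs.Pairwise (· < ·)) (hy : ys.Pairwise (· < ·)) :
    mergeScan xs ys = true ↔ ∃ x, x ∈ xs ∧ x ∈ ys := by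
  induction xs, ys using mergeScan.induct with
  | case1 ys => simp [mergeScan]
  | case2 a as => simp [mergeScan]
  | case3 a as b bs hab ih =>
    rw [List.pairwise_cons] at hx
    rw [mergeScan, if_pos hab, ih hx.2 hy]
    constructor
    · rintro ⟨x, h1, h2⟩; exact ⟨x, List.mem_cons_of_mem _ h1, h2⟩
    · rintro ⟨x, h1, h2⟩
      rcases List.mem_cons.mp h1 with rfl | h1'
      · exfalso
        rcases List.mem_cons.mp h2 with rfl | h2'
        · exact lt_irrefl x hab
        · exact lt_irrefl x (hab.trans ((List.pairwise_cons.mp hy).1 x h2'))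
      · exact ⟨x, h1', h2⟩
  | case4 a as b bs hab hba ih =>
    rw [List.pairwise_cons] at hy
    rw [mergeScan, if_neg hab, if_pos hba, ih hx hy.2]
    constructor
    · rintro ⟨x, h1, h2⟩; exact ⟨x, h1, List.mem_cons_of_mem _ h2⟩
    · rintro ⟨x, h1, h2⟩
      rcases List.mem_cons.mp h2 with rfl | h2'
      · exfalso
        rcases List.mem_cons.mp h1 with rfl | h1'
        · exact lt_irrefl x hba
        · exact lt_irrefl x (hba.trans ((List.pairwise_cons.mp hx).1 x h1'))
      · exact ⟨x, h1, h2'⟩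
  | case5 a as b bs hab hba =>
    have hba' : b = a := le_antisymm (not_lt.mp hab) (not_lt.mp hba)
    subst hba'
    rw [mergeScan, if_neg hab, if_neg hba]
    simp only [true_iff]
    exact ⟨b, List.mem_cons_self, List.mem_cons_self⟩

-- ===== VERDICT (by name: the statement is the Claim_ definition above) =====
theorem evidence_overlap_spec : Claim_equal_evidence_overlap := by
  intro events gold_evidence_ids _
  unfold Spec_evidence_overlap evidence_overlap evidence_overlap_alt
  by_cases hg : gold_evidence_ids.isEmpty
  · simp [hg]
  · rw [if_neg hg, if_neg hg, Bool.eq_iff_iff, loopA_eq_true_iff,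
      mergeScan_eq_true_iff _ _ (PySem.List.sorted_ofList_pairwise_lt _)
        (PySem.List.sorted_ofList_pairwise_lt _)]
    simp only [PySem.List.mem_sorted, PySem.Set.mem_ofList, List.mem_flatMap]
    constructor
    · rintro ⟨e, he, x, hx, hd⟩; exact ⟨x, ⟨e, he, hd⟩, hx⟩
    · rintro ⟨x, ⟨e, he, hd⟩, hx⟩; exact ⟨e, he, x, hx, hd⟩
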